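-- pv_equiv track=rewrite | github.com/pypi-data/pypi-mirror-30 | packages/MiModD/MiModD-0.1.9-cp37-cp37m-macosx_10_6_intel.macosx_10_9_intel.macosx_10_10_intel.macosx_10_6_x86_64.macosx_10_9_x86_64.macosx_10_10_x86_64.whl/MiModD/convert.py | parse_idmapping
-- ===== SOURCE A (Python) =====
-- def parse_idmapping (cl_idlist):
--     modlen = len(cl_idlist) % 3
--     if modlen:
--         raise ValueError(
--             'Encountered truncated list of id mappings. Incomplete mapping: "{0}"'
--             .format(''.join(cl_idlist[-modlen:])))
--     old_ids = cl_idlist[::3]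
--     seps = cl_idlist[1::3]
--     new_ids = cl_idlist[2::3]
--     for index, sep in enumerate(seps):
--         if sep != ':':
--             raise ValueError(
--                 'Expected "OLD_ID":"NEW_ID" mapping format. Found: "{0}{1}{2}"'
--                 .format(old_ids[index], sep, new_ids[index]))
--     mapping = dict(zip(old_ids, new_ids))
--     return mapping
-- ===== SOURCE B (Python) =====
-- def parse_idmapping(cl_idlist):
--     modlen = len(cl_idlist) % 3
--     if modlen:
--         raise ValueError(
--             'Encountered truncated list of id mappings. Incomplete mapping: "{0}"'
--             .format(''.join(cl_idlist[-modlen:])))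
--     mapping = {}
--     it = iter(cl_idlist)
--     for old_id, sep, new_id in zip(it, it, it):
--         if sep != ':':
--             raise ValueError(
--                 'Expected "OLD_ID":"NEW_ID" mapping format. Found: "{0}{1}{2}"'
--                 .format(old_id, sep, new_id))
--         mapping[old_id] = new_id
--     return mapping
-- ===== Notes on version B (the rewrite author's own statement) =====
-- stated objective: simpler
-- what changed: A's four passes (three strided slices, a separate validation loop over enumerate, and a final dict(zip(...))) are fused into one single pass that walks the list in (old, sep, new) triples, validating the separator and inserting into the dict incrementally.
import Mathlib
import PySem

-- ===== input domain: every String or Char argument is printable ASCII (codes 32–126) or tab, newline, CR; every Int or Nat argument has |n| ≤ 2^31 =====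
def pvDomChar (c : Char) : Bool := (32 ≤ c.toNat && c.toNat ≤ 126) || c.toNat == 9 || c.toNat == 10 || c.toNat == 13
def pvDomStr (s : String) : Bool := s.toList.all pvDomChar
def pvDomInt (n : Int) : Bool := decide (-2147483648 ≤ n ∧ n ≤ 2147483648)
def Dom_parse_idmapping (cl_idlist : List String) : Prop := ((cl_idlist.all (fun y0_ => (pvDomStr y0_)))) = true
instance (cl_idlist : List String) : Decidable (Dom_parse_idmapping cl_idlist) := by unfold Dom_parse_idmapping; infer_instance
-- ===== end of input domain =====

-- B fuses A's four passes (three strided slices, a validation loop, dict(zip)) into one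
-- single pass over (old, sep, new) triples; same return value wherever A returns.

-- ===== PORT A =====
-- literal transliteration of A: modlen guard, three step-3 slices, validation loop over
-- enumerate(seps) (a raise is modelled as returning []; Pre_ excludes it), dict(zip(...)).
def parse_idmapping (cl_idlist : List String) : List (String × String) :=
  let modlen : Int := PySem.Int.mod (cl_idlist.length : Int) 3
  if modlen ≠ 0 then []  -- raise ValueError (truncated list)
  else
    let old_ids := (PySem.List.slice? cl_idlist none none 3).getD []
    let seps := (PySem.List.slice? cl_idlist (some 1) none 3).getD []
    let new_ids := (PySem.List.slice? cl_idlist (some 2) none 3).getD []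
    if (PySem.List.enumerate seps).all (fun p => p.2 == ":")
    then (PySem.Dict.ofList (old_ids.zip new_ids)).items
    else []  -- raise ValueError (bad separator)

-- ===== PORT B =====
-- B's loop 'for old_id, sep, new_id in zip(it, it, it)': consume the list three at a time,
-- validating the separator (none = raise) and inserting into the dict incrementally.
def parseGo : List String → PySem.Dict String String → Option (PySem.Dict String String)
  | old_id :: sep :: new_id :: rest, d =>
      if sep == ":" then parseGo rest (d.insert old_id new_id)
      else none  -- raise ValueError (bad separator)
  | _, d => some d

def parse_idmapping_alt (cl_idlist : List String) : List (String × String) :=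
  let modlen : Int := PySem.Int.mod (cl_idlist.length : Int) 3
  if modlen ≠ 0 then []  -- raise ValueError (truncated list)
  else
    match parseGo cl_idlist PySem.Dict.empty with
    | some d => d.items
    | none => []

-- ===== PRECONDITION & SPEC =====
-- Pre_ excludes exactly the inputs on which Python A raises ValueError: lists whose length
-- is not a multiple of 3, and lists with a separator (element at index ≡ 1 mod 3) ≠ ":".
def Pre_parse_idmapping (cl_idlist : List String) : Prop :=
  cl_idlist.length % 3 = 0 ∧
    ∀ i < cl_idlist.length, i % 3 = 1 → cl_idlist.getD i "" = ":"
instance (cl_idlist : List String) : Decidable (Pre_parse_idmapping cl_idlist) := by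
  unfold Pre_parse_idmapping; infer_instance

def pvWitness_parse_idmapping : List String := ["old1", ":", "new1", "old2", ":", "new2"]

def Spec_parse_idmapping (cl_idlist : List String) (out : List (String × String)) : Prop := out = parse_idmapping_alt cl_idlist
instance (cl_idlist : List String) (out : List (String × String)) : Decidable (Spec_parse_idmapping cl_idlist out) := by unfold Spec_parse_idmapping; infer_instance

-- ===== CLAIM (what is proved, stated in full; the proofs are below) =====
def Claim_equal_parse_idmapping : Prop := ∀ (cl_idlist : List String), Dom_parse_idmapping cl_idlist → Pre_parse_idmapping cl_idlist → Spec_parse_idmapping cl_idlist (parse_idmapping cl_idlist)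

-- ===== LEMMAS AND PROOFS =====

-- the three strided projections of a chunked list, and the zipped pairs
def chunkFst : List String → List String
  | a :: _ :: _ :: r => a :: chunkFst r
  | _ => []
def chunkSep : List String → List String
  | _ :: s :: _ :: r => s :: chunkSep r
  | _ => []
def chunkSnd : List String → List String
  | _ :: _ :: b :: r => b :: chunkSnd r
  | _ => []

-- slice with step 3 and a nonnegative in-range start, as a filterMap over indices
theorem stride3 {α : Type} (xs : List α) (s : Nat) (hs : s ≤ xs.length) :
    PySem.List.slice? xs (some (s:Int)) none 3 =
      some (List.filterMap (fun k => xs[s+3*k]?) (List.range ((xs.length - s + 2)/3))) := by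
  simp only [PySem.List.slice?, PySem.List.sliceIndices]
  try norm_num
  have hcl : (if (s:Int) < 0 then max ((s:Int) + ↑xs.length) 0 else min (s:Int) ↑xs.length) = (s:Int) := by omega
  rw [hcl]
  have hcnt : (if (s:Int) < ↑xs.length then (((↑xs.length - (s:Int)) + 3 - 1) / 3).toNat else 0)
      = (xs.length - s + 2)/3 := by
    split <;> omega
  rw [hcnt]
  apply List.filterMap_congr
  intro k _
  congr 1

theorem stride3_none {α : Type} (xs : List α) :
    PySem.List.slice? xs none none 3 =
      some (List.filterMap (fun k => xs[3*k]?) (List.range ((xs.length + 2)/3))) := by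
  simp only [PySem.List.slice?, PySem.List.sliceIndices]
  try norm_num
  have hcnt : (if 0 < xs.length then (((xs.length:Int) + 3 - 1) / 3).toNat else 0)
      = (xs.length + 2)/3 := by split <;> omega
  rw [hcnt]
  apply List.filterMap_congr
  intro k _
  congr 1

-- peeling one chunk off the filterMap form
theorem fm_cons {α : Type} (x y z : α) (r : List α) (s : Nat) (hs : s < 3) :
    List.filterMap (fun k => (x::y::z::r)[s+3*k]?) (List.range (((x::y::z::r).length - s + 2)/3))
      = [x,y,z].get ⟨s, hs⟩ :: List.filterMap (fun k => r[s+3*k]?) (List.range ((r.length - s + 2)/3)) := by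
  have hc : ((x::y::z::r).length - s + 2)/3 = (r.length - s + 2)/3 + 1 := by
    simp only [List.length_cons]; omega
  rw [hc, List.range_succ_eq_map, List.filterMap_cons, List.filterMap_map]
  have h0 : (x::y::z::r)[s+3*0]? = some ([x,y,z].get ⟨s, hs⟩) := by
    interval_cases s <;> simp
  rw [h0]
  congr 1

theorem chunk_slices (cl : List String) (h3 : cl.length % 3 = 0) :
    (PySem.List.slice? cl none none 3).getD [] = chunkFst cl ∧
    (PySem.List.slice? cl (some 1) none 3).getD [] = chunkSep cl ∧
    (PySem.List.slice? cl (some 2) none 3).getD [] = chunkSnd cl := by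
  induction cl using chunkFst.induct with
  | case1 x y z r ih =>
    have hr3 : r.length % 3 = 0 := by simp at h3; omega
    have h1 : (1:Nat) ≤ (x::y::z::r).length := by simp
    have h2 : (2:Nat) ≤ (x::y::z::r).length := by simp
    obtain ⟨e0, e1, e2⟩ := ih hr3
    have s0 := stride3_none (x::y::z::r)
    have s1 := stride3 (x::y::z::r) 1 h1
    have s2 := stride3 (x::y::z::r) 2 h2
    push_cast at s1 s2
    rw [s0, s1, s2]
    have r0 := stride3_none r
    have r1 : (PySem.List.slice? r (some 1) none 3).getD []
        = List.filterMap (fun k => r[1+3*k]?) (List.range ((r.length - 1 + 2)/3)) := by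
      rcases r with _ | ⟨a, r'⟩
      · simp [PySem.List.slice?, PySem.List.sliceIndices]
      · have h := stride3 (a::r') 1 (by simp)
        push_cast at h
        rw [h]; rfl
    have r2 : (PySem.List.slice? r (some 2) none 3).getD []
        = List.filterMap (fun k => r[2+3*k]?) (List.range ((r.length - 2 + 2)/3)) := by
      rcases r with _ | ⟨a, r'⟩
      · simp [PySem.List.slice?, PySem.List.sliceIndices]
      · rcases r' with _ | ⟨b, r''⟩
        · exfalso; simp at hr3
        · have h := stride3 (a::b::r'') 2 (by simp)
          push_cast at h
          rw [h]; rfl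
    refine ⟨?_, ?_, ?_⟩
    · rw [r0] at e0
      have := fm_cons x y z r 0 (by omega)
      simp only [Nat.zero_add, Nat.sub_zero] at this ⊢
      simp only [Option.getD_some]
      rw [this]
      simp only [Option.getD_some] at e0
      rw [e0]
      rfl
    · rw [r1] at e1
      have := fm_cons x y z r 1 (by omega)
      simp only [Option.getD_some]
      rw [this, e1]
      rfl
    · rw [r2] at e2
      have := fm_cons x y z r 2 (by omega)
      simp only [Option.getD_some]
      rw [this, e2]
      rfl
  | case2 cl hshape =>
    -- cl has no full leading chunk; with length % 3 = 0 it must be []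
    match cl, hshape with
    | [], _ => exact ⟨rfl, rfl, rfl⟩
    | [a], h => simp at h3
    | [a, b], h => simp at h3
    | a :: b :: c :: r, h => exact absurd rfl (h a b c r)

-- separator hypothesis transported to the chunk view
theorem chunkSep_all (cl : List String) (h3 : cl.length % 3 = 0)
    (hsep : ∀ i < cl.length, i % 3 = 1 → cl.getD i "" = ":") :
    ∀ s ∈ chunkSep cl, s = ":" := by
  induction cl using chunkSep.induct with
  | case1 x y z r ih =>
    have hr3 : r.length % 3 = 0 := by simp at h3; omega
    have hy : y = ":" := by
      have := hsep 1 (by simp) (by norm_num)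
      simpa using this
    have hrsep : ∀ i < r.length, i % 3 = 1 → r.getD i "" = ":" := by
      intro i hi hm
      have := hsep (i+3) (by simp; omega) (by omega)
      simpa using this
    intro s hs
    simp only [chunkSep, List.mem_cons] at hs
    rcases hs with rfl | h
    · exact hy
    · exact ih hr3 hrsep s h
  | case2 cl hshape =>
    match cl, hshape with
    | [], _ => intro s hs; simp [chunkSep] at hs
    | [a], _ => intro s hs; simp [chunkSep] at hs
    | [a, b], _ => intro s hs; simp [chunkSep] at hs
    | a :: b :: c :: r, h => exact absurd rfl (h a b c r)

-- A's validation loop succeeds when every separator is ":"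
theorem enumerate_all_sep (seps : List String) (h : ∀ s ∈ seps, s = ":") :
    (PySem.List.enumerate seps).all (fun p => p.2 == ":") = true := by
  rw [List.all_eq_true]
  intro p hp
  have : p.2 ∈ (PySem.List.enumerate seps).map (·.2) := List.mem_map_of_mem hp
  rw [PySem.List.map_snd_enumerate] at this
  simp [h p.2 this]

-- B's single pass computes the same fold of inserts as dict(zip(old_ids, new_ids))
theorem parseGo_eq (cl : List String) (h3 : cl.length % 3 = 0)
    (hall : ∀ s ∈ chunkSep cl, s = ":") (d : PySem.Dict String String) :
    parseGo cl d =
      some (((chunkFst cl).zip (chunkSnd cl)).foldl (fun acc p => acc.insert p.1 p.2) d) := by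
  induction cl using chunkSep.induct generalizing d with
  | case1 x y z r ih =>
    have hr3 : r.length % 3 = 0 := by simp at h3; omega
    have hy : y = ":" := hall y (by simp [chunkSep])
    have hrall : ∀ s ∈ chunkSep r, s = ":" := fun s hs => hall s (by simp [chunkSep]; right; exact hs)
    simp only [parseGo, hy, beq_self_eq_true, if_pos]
    rw [ih hr3 hrall]
    rfl
  | case2 cl hshape =>
    match cl, hshape with
    | [], _ => rfl
    | [a], h => simp at h3
    | [a, b], h => simp at h3
    | a :: b :: c :: r, h => exact absurd rfl (h a b c r)

-- ===== VERDICT (by name: the statement is the Claim_ definition above) =====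
theorem parse_idmapping_spec : Claim_equal_parse_idmapping := by
  intro cl _ hpre
  obtain ⟨h3, hsep⟩ := hpre
  unfold Spec_parse_idmapping parse_idmapping parse_idmapping_alt
  have hmod : PySem.Int.mod (cl.length : Int) 3 = 0 := by
    rw [PySem.Int.mod_eq_emod_of_pos (by norm_num)]; omega
  simp only [hmod, ne_eq, not_true_eq_false, if_neg, not_false_eq_true]
  obtain ⟨e0, e1, e2⟩ := chunk_slices cl h3
  rw [e0, e1, e2]
  have hall := chunkSep_all cl h3 hsep
  rw [enumerate_all_sep (chunkSep cl) hall, if_pos rfl]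
  rw [parseGo_eq cl h3 hall PySem.Dict.empty]
  rfl
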